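-- pv_equiv track=rewrite | github.com/KarinaJadia/ScheduleBuilder | sandbox.py | time_conflicts
-- ===== SOURCE A (Python) =====
-- def time_conflicts(section1, section2): # check if two sections conflict based on meeting times (takes meeting times)
--     """
--     takes 2 section meeting times, returns false if no conflicts and true if conflicts
--     make sure to only pass meeting times, so like sections['class']['meeting'] for both
--     """
--     if not section1 or not section2: # if one section does not meet
--         return False # no conflicts
--
--     for s1st in section1['starts']:
--         s1st = s1st.split() # so it should become ['M', 200]
--         s1st[1] = int(s1st[1])
--         for i, s2en in enumerate(section2['ends']):
--             s2en = s2en.split() # so it should become ['M', 200]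
--             s2en[1] = int(s2en[1])
--             if s1st[0] == s2en[0] and s1st[1] < s2en[1]:
--                 s2st = section2['starts'][i].split()
--                 s2st[1] = int(s2st[1])
--                 if s1st[1] > s2st[1]:
--                     return True # conflicts
--
--     section2, section1 = section1, section2 # i'm lazy
--     for s1st in section1['starts']:
--         s1st = s1st.split() # so it should become ['M', 200]
--         s1st[1] = int(s1st[1])
--         for i, s2en in enumerate(section2['ends']):
--             s2en = s2en.split() # so it should become ['M', 200]
--             s2en[1] = int(s2en[1])
--             if s1st[0] == s2en[0] and s1st[1] < s2en[1]:
--                 s2st = section2['starts'][i].split()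
--                 s2st[1] = int(s2st[1])
--                 if s1st[1] > s2st[1]:
--                     return True # conflicts
--
--     return False # no conflicts
-- ===== SOURCE B (Python) =====
-- def time_conflicts(section1, section2): # check if two sections conflict based on meeting times (takes meeting times)
--     if not section1 or not section2: # if one section does not meet
--         return False
--
--     def parse(strings): # "M 200" -> ('M', 200)
--         out = []
--         for s in strings:
--             t = s.split()
--             out.append((t[0], int(t[1])))
--         return out
--
--     def merge(pairs):
--         # sort by start and fuse overlapping open intervals into disjoint maximal ones
--         pairs.sort(key=lambda p: p[0])
--         out = []
--         for lo, hi in pairs: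
--             if out and lo < out[-1][1]:
--                 out[-1] = (out[-1][0], max(out[-1][1], hi))
--             else:
--                 out.append((lo, hi))
--         return out
--
--     def coverage(sec):
--         # day (of the END string) -> disjoint open intervals covering sec's meetings
--         buckets = {}
--         for (_, lo), (day, hi) in zip(parse(sec['starts']), parse(sec['ends'])):
--             if lo < hi:  # empty/reversed intervals cover no point
--                 buckets.setdefault(day, []).append((lo, hi))
--         return {day: merge(pairs) for day, pairs in buckets.items()}
--
--     def hits(sec, cov):
--         # does some start of sec fall strictly inside the other section's coverage?
--         return any(lo < t < hi
--                    for day, t in parse(sec['starts'])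
--                    for lo, hi in cov.get(day, []))
--
--     return hits(section1, coverage(section2)) or hits(section2, coverage(section1))
-- ===== Notes on version B (the rewrite author's own statement) =====
-- stated objective: alternative
-- what changed: B replaces A's pairwise start-vs-interval scans by classic interval merging: per day it sorts the other section's (start,end) intervals, fuses them into disjoint maximal open intervals, and then tests each start time for membership in that merged coverage; correct because merging open intervals sorted by start preserves exactly the set of points strictly inside some interval.
-- outside the precondition, e.g. on time_conflicts({'starts': []}, {'starts': [], 'ends': []}): A returns False, B raises KeyError
import Mathlib
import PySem

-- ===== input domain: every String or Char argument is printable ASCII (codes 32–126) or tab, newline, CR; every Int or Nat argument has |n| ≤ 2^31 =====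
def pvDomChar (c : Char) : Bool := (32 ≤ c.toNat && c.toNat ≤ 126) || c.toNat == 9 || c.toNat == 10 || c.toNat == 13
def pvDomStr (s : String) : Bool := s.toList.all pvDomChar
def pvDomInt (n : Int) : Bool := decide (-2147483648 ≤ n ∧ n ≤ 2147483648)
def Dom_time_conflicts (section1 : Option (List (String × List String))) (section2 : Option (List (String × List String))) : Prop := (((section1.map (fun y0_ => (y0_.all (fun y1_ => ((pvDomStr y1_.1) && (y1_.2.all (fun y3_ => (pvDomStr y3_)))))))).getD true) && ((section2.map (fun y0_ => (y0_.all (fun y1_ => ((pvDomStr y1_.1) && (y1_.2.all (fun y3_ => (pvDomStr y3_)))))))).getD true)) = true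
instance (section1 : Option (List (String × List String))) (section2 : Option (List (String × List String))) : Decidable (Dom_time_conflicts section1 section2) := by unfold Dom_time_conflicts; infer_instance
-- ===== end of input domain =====

-- B replaces A's pairwise scans by per-day interval MERGING (sort + fuse into disjoint open intervals),
-- then membership tests of the other section's start times (objective: alternative algorithm, same results).

-- ===== PORT A =====
-- s.split() then ['M', 200]: token 0 is the day, token 1 parsed as int
def pvParseA (s : String) : Option (String × Int) :=
  let toks := PySem.Str.split₀ s
  match PySem.List.pyGet? toks 0, (PySem.List.pyGet? toks 1).bind PySem.Int.ofStr? with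
  | some d, some n => some (d, n)
  | _, _ => none

-- inner loop: for i, s2en in enumerate(section2['ends']): …  (none from a primitive = Python raises; unreached under Pre_)
def pvInnerA (da : String) (ta : Int) (d2 : List (String × List String)) :
    List (Int × String) → Bool
  | [] => false
  | (i, e) :: rest =>
    match pvParseA e with
    | none => false
    | some (de, te) =>
      if da == de && ta < te then
        match List.lookup "starts" d2 with
        | none => false
        | some st2 =>
          match (PySem.List.pyGet? st2 i).bind
              (fun s => (PySem.List.pyGet? (PySem.Str.split₀ s) 1).bind PySem.Int.ofStr?) with
          | none => false
          | some ts => if ta > ts then true else pvInnerA da ta d2 rest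
      else pvInnerA da ta d2 rest

-- outer loop: for s1st in section1['starts']: …
def pvOuterA (d2 : List (String × List String)) : List String → Bool
  | [] => false
  | s :: rest =>
    match pvParseA s with
    | none => false
    | some (da, ta) =>
      match List.lookup "ends" d2 with
      | none => false
      | some en2 =>
        if pvInnerA da ta d2 (PySem.List.enumerate en2) then true
        else pvOuterA d2 rest

def time_conflicts (section1 : Option (List (String × List String))) (section2 : Option (List (String × List String))) : Bool :=
  match section1, section2 with
  | some d1, some d2 =>
    if d1.isEmpty || d2.isEmpty then false
    else
      match List.lookup "starts" d1 with
      | none => false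
      | some st1 =>
        if pvOuterA d2 st1 then true
        else  -- section2, section1 = section1, section2
          match List.lookup "starts" d2 with
          | none => false
          | some st2 => pvOuterA d1 st2
  | _, _ => false

-- ===== PORT B =====
def pvParseTok (s : String) : Option (String × Int) :=
  let t := PySem.Str.split₀ s
  match PySem.List.pyGet? t 0, (PySem.List.pyGet? t 1).bind PySem.Int.ofStr? with
  | some d, some n => some (d, n)
  | _, _ => none

def pvParseList (l : List String) : List (String × Int) :=
  l.filterMap pvParseTok

-- one step of the merge loop: out[-1] is fused with (lo, hi) when they overlap, else (lo, hi) is appended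
def pvStep (out : List (Int × Int)) (p : Int × Int) : List (Int × Int) :=
  match out.getLast? with
  | some lastp => if p.1 < lastp.2 then out.dropLast ++ [(lastp.1, max lastp.2 p.2)] else out ++ [p]
  | none => [p]

-- merge(pairs): sort by start, fuse overlapping open intervals
def pvMerge (pairs : List (Int × Int)) : List (Int × Int) :=
  (PySem.List.sorted pairs (fun p => p.1) false).foldl pvStep []

-- buckets: day (of the END string) -> nonempty (lo, hi) intervals
def pvBuckets (sec : List (String × List String)) : PySem.Dict String (List (Int × Int)) :=
  ((pvParseList ((List.lookup "starts" sec).getD [])).zip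
     (pvParseList ((List.lookup "ends" sec).getD []))).foldl
    (fun d q => if q.1.2 < q.2.2 then d.modify q.2.1 [] (· ++ [(q.1.2, q.2.2)]) else d)
    PySem.Dict.empty

-- coverage: merge each day's bucket
def pvCoverage (sec : List (String × List String)) : PySem.Dict String (List (Int × Int)) :=
  (pvBuckets sec).items.foldl (fun m it => m.insert it.1 (pvMerge it.2)) PySem.Dict.empty

-- hits: some start of sec strictly inside cov's same-day coverage?
def pvHits (sec : List (String × List String)) (cov : PySem.Dict String (List (Int × Int))) : Bool :=
  (pvParseList ((List.lookup "starts" sec).getD [])).any fun p =>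
    (cov.getD p.1 []).any fun q => q.1 < p.2 && p.2 < q.2

def time_conflicts_alt (section1 : Option (List (String × List String))) (section2 : Option (List (String × List String))) : Bool :=
  match section1, section2 with
  | some d1, some d2 =>
    if d1.isEmpty || d2.isEmpty then false
    else pvHits d1 (pvCoverage d2) || pvHits d2 (pvCoverage d1)
  | _, _ => false

-- ===== PRECONDITION & SPEC =====
-- a meeting-time string is well formed: at least two whitespace tokens, the second an int literal
def pvWF (s : String) : Bool :=
  match PySem.Str.split₀ s with
  | _ :: t :: _ => (PySem.Int.ofStr? t).isSome
  | _ => false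

def pvOkSec (d : List (String × List String)) : Bool :=
  match List.lookup "starts" d, List.lookup "ends" d with
  | some st, some en => st.length == en.length && st.all pvWF && en.all pvWF
  | _, _ => false

-- Pre_ admits falsy sections and otherwise requires both sections to carry 'starts' and 'ends' of equal
-- length with every string well formed.  This excludes inputs where A raises (KeyError/IndexError/ValueError)
-- and also a few where A happens to return False only because its lazy loops never reach the missing key,
-- the out-of-range index or the malformed string (see cites).
def Pre_time_conflicts (section1 : Option (List (String × List String))) (section2 : Option (List (String × List String))) : Prop :=
  (match section1, section2 with
   | some d1, some d2 => d1.isEmpty || d2.isEmpty || (pvOkSec d1 && pvOkSec d2)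
   | _, _ => true) = true
instance (section1 : Option (List (String × List String))) (section2 : Option (List (String × List String))) : Decidable (Pre_time_conflicts section1 section2) := by unfold Pre_time_conflicts; infer_instance

def pvWitness_time_conflicts : (Option (List (String × List String))) × (Option (List (String × List String))) :=
  (some [("starts", ["M 100"]), ("ends", ["M 200"])],
   some [("starts", ["M 150"]), ("ends", ["M 250"])])

def Spec_time_conflicts (section1 : Option (List (String × List String))) (section2 : Option (List (String × List String))) (out : Bool) : Prop := out = time_conflicts_alt section1 section2
instance (section1 : Option (List (String × List String))) (section2 : Option (List (String × List String))) (out : Bool) : Decidable (Spec_time_conflicts section1 section2 out) := by unfold Spec_time_conflicts; infer_instance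

-- ===== CLAIM (what is proved, stated in full; the proofs are below) =====
def Claim_equal_time_conflicts : Prop := ∀ (section1 : Option (List (String × List String))) (section2 : Option (List (String × List String))), Dom_time_conflicts section1 section2 → Pre_time_conflicts section1 section2 → Spec_time_conflicts section1 section2 (time_conflicts section1 section2)

-- ===== LEMMAS AND PROOFS =====

-- proof-side normal form of parsing "M 200"
def pvVal (s : String) : Option (String × Int) :=
  match PySem.Str.split₀ s with
  | d :: t :: _ => (PySem.Int.ofStr? t).map (fun n => (d, n))
  | _ => none

def pvSome (s : String) : String × Int := (pvVal s).getD ("", 0)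

def pvHitP (a : String × Int) (ts : Int) (e : String × Int) : Bool :=
  a.1 == e.1 && decide (a.2 < e.2) && decide (ts < a.2)

-- the common semantic kernel both ports are reduced to
def pvConf (st1 st2 en2 : List String) : Bool :=
  st1.any fun s => (st2.zip en2).any fun q => pvHitP (pvSome s) (pvSome q.1).2 (pvSome q.2)

-- "t is strictly inside some interval of L"
def pvCov (L : List (Int × Int)) (t : Int) : Bool :=
  L.any fun q => q.1 < t && t < q.2

lemma pvParseA_eq (s : String) : pvParseA s = pvVal s := by
  unfold pvParseA pvVal
  have h0 : ∀ (k : Nat), (0:ℤ) ≤ (k:ℤ) + 1 := by omega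
  rcases h : PySem.Str.split₀ s with _ | ⟨d, _ | ⟨t, r⟩⟩ <;>
    simp [PySem.List.pyGet?, PySem.List.pyIdx?, h0]
  rcases PySem.Int.ofStr? t with _ | n <;> simp

lemma pvParseTok_eq (s : String) : pvParseTok s = pvVal s := by
  unfold pvParseTok pvVal
  have h0 : ∀ (k : Nat), (0:ℤ) ≤ (k:ℤ) + 1 := by omega
  rcases h : PySem.Str.split₀ s with _ | ⟨d, _ | ⟨t, r⟩⟩ <;>
    simp [PySem.List.pyGet?, PySem.List.pyIdx?, h0]
  rcases PySem.Int.ofStr? t with _ | n <;> simp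

lemma pvTokInt_eq (s : String) :
    (PySem.List.pyGet? (PySem.Str.split₀ s) 1).bind PySem.Int.ofStr? = (pvVal s).map (·.2) := by
  unfold pvVal
  rcases h : PySem.Str.split₀ s with _ | ⟨d, _ | ⟨t, r⟩⟩ <;>
    simp [PySem.List.pyGet?, PySem.List.pyIdx?]

lemma pvWF_isSome {s : String} (h : pvWF s = true) : ∃ p, pvVal s = some p := by
  unfold pvWF at h
  unfold pvVal
  rcases hs : PySem.Str.split₀ s with _ | ⟨d, _ | ⟨t, r⟩⟩ <;> simp [hs] at h ⊢
  rcases ho : PySem.Int.ofStr? t with _ | n <;> simp [ho] at h ⊢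

lemma pvSome_eq {s : String} {p : String × Int} (h : pvVal s = some p) : pvSome s = p := by
  simp [pvSome, h]

lemma pvParseList_eq (l : List String) (h : ∀ s ∈ l, pvWF s = true) :
    pvParseList l = l.map pvSome := by
  induction l with
  | nil => rfl
  | cons a l ih =>
    obtain ⟨p, hp⟩ := pvWF_isSome (h a (by simp))
    have ihh := ih (fun s hs => h s (by simp [hs]))
    simp only [pvParseList, List.filterMap_cons, pvParseTok_eq, hp, List.map_cons] at ihh ⊢
    simp [pvSome_eq hp, ihh]

lemma pvInnerA_eq (da : String) (ta : Int) (d2 : List (String × List String))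
    (st2 : List String) (hlk : List.lookup "starts" d2 = some st2)
    (hst : ∀ s ∈ st2, pvWF s = true) :
    ∀ (en : List String) (n : Nat), (∀ e ∈ en, pvWF e = true) → n + en.length ≤ st2.length →
      pvInnerA da ta d2 (PySem.List.enumerate en (n : Int)) =
        ((st2.drop n).zip en).any (fun q => pvHitP (da, ta) (pvSome q.1).2 (pvSome q.2)) := by
  intro en
  induction en with
  | nil => intro n _ _; simp [pvInnerA]
  | cons e rest ih =>
    intro n hen hlen
    have hn : n < st2.length := by
      simp only [List.length_cons] at hlen; omega
    obtain ⟨⟨de, te⟩, hve⟩ := pvWF_isSome (hen e (by simp))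
    obtain ⟨⟨ds, ts⟩, hvs⟩ := pvWF_isSome (hst st2[n] (List.getElem_mem hn))
    rw [PySem.List.enumerate_cons]
    have hrec : ((n : Int) + 1) = ((n + 1 : Nat) : Int) := by push_cast; ring
    rw [List.drop_eq_getElem_cons hn]
    simp only [pvInnerA, pvParseA_eq, hve, hlk, PySem.List.pyGet?_natCast,
      List.getElem?_eq_getElem hn, Option.bind_some, pvTokInt_eq, hvs, Option.map_some,
      List.zip_cons_cons, List.any_cons, hrec,
      ih (n + 1) (fun x hx => hen x (by simp [hx])) (by simp only [List.length_cons] at hlen; omega)]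
    rw [pvSome_eq hvs, pvSome_eq hve]
    simp only [pvHitP]
    cases h1 : (da == de) <;> cases h2 : decide (ta < te) <;> cases h3 : decide (ts < ta) <;>
      simp [h3, gt_iff_lt]

lemma pvOuterA_eq (d2 : List (String × List String)) (st2 en2 : List String)
    (hlkS : List.lookup "starts" d2 = some st2) (hlkE : List.lookup "ends" d2 = some en2)
    (hst2 : ∀ s ∈ st2, pvWF s = true) (hen2 : ∀ s ∈ en2, pvWF s = true)
    (hlen : st2.length = en2.length) :
    ∀ st1, (∀ s ∈ st1, pvWF s = true) → pvOuterA d2 st1 = pvConf st1 st2 en2 := by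
  intro st1
  induction st1 with
  | nil => intro _; simp [pvOuterA, pvConf]
  | cons s rest ih =>
    intro h1
    obtain ⟨⟨da, ta⟩, hv⟩ := pvWF_isSome (h1 s (by simp))
    have hinner := pvInnerA_eq da ta d2 st2 hlkS hst2 en2 0 hen2 (by omega)
    simp only [Nat.cast_zero, List.drop_zero] at hinner
    have ihh := ih (fun x hx => h1 x (by simp [hx]))
    simp only [pvOuterA, pvParseA_eq, hv, hlkE, hinner, pvConf, List.any_cons, ihh,
      pvSome_eq hv]
    cases ((st2.zip en2).any fun q => pvHitP (da, ta) (pvSome q.1).2 (pvSome q.2)) <;> simp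

-- merging preserves strict-interior membership, provided the list is sorted by interval start
lemma pvCov_foldl (t : Int) :
    ∀ (l acc : List (Int × Int)), l.Pairwise (fun p q => p.1 ≤ q.1) →
      (∀ a b, acc.getLast? = some (a, b) → ∀ p ∈ l, a ≤ p.1) →
      pvCov (l.foldl pvStep acc) t = (pvCov acc t || pvCov l t) := by
  intro l
  induction l with
  | nil => intro acc _ _; simp [pvCov]
  | cons p l ih =>
    intro acc hpw hacc
    have hpw' := (List.pairwise_cons.mp hpw).2
    have hhead := (List.pairwise_cons.mp hpw).1
    simp only [List.foldl_cons]
    rcases hlast : acc.getLast? with _ | ⟨a, b⟩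
    · have hanil : acc = [] := List.getLast?_eq_none_iff.mp hlast
      subst hanil
      have hstep : pvStep [] p = [p] := rfl
      rw [hstep, ih [p] hpw' (by
        intro a b hab q hq
        rw [List.getLast?_singleton, Option.some.injEq] at hab
        subst hab
        exact hhead q hq)]
      simp [pvCov]
    · have hne : acc ≠ [] := by intro h; rw [h] at hlast; simp at hlast
      have hdecomp : acc.dropLast ++ [(a, b)] = acc := by
        have := List.dropLast_concat_getLast hne
        rwa [List.getLast_eq_iff_getLast?_eq_some hne |>.mpr hlast] at this
      have hap : a ≤ p.1 := hacc a b hlast p (by simp)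
      by_cases hpb : p.1 < b
      · have hstep : pvStep acc p = acc.dropLast ++ [(a, max b p.2)] := by
          simp [pvStep, hlast, hpb]
        rw [hstep, ih _ hpw' (by
          intro a' b' hab q hq
          rw [List.getLast?_concat] at hab
          have ha' : a' = a := by cases hab; rfl
          rw [ha']; exact le_trans hap (hhead q hq))]
        conv_rhs => rw [← hdecomp]
        simp only [pvCov, List.any_append, List.any_cons, List.any_nil]
        have hcore : (decide (a < t) && decide (t < max b p.2)) =
            ((decide (a < t) && decide (t < b)) || (decide (p.1 < t) && decide (t < p.2))) := by
          rw [Bool.eq_iff_iff]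
          simp only [Bool.and_eq_true, Bool.or_eq_true, decide_eq_true_eq]
          omega
        rw [hcore]
        cases acc.dropLast.any fun q => decide (q.1 < t) && decide (t < q.2) <;>
          cases l.any fun q => decide (q.1 < t) && decide (t < q.2) <;>
          cases decide (a < t) && decide (t < b) <;>
          cases decide (p.1 < t) && decide (t < p.2) <;> rfl
      · have hstep : pvStep acc p = acc ++ [p] := by
          simp [pvStep, hlast, hpb]
        rw [hstep, ih _ hpw' (by
          intro a' b' hab q hq
          rw [List.getLast?_concat] at hab
          have ha' : a' = p.1 := by cases hab; rfl
          rw [ha']; exact hhead q hq)]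
        simp [pvCov, List.any_append, Bool.or_assoc]

lemma pvCov_perm {l₁ l₂ : List (Int × Int)} (h : l₁.Perm l₂) (t : Int) :
    pvCov l₁ t = pvCov l₂ t := by
  rw [Bool.eq_iff_iff]
  simp only [pvCov, List.any_eq_true]
  constructor <;> rintro ⟨q, hq, hh⟩
  · exact ⟨q, h.mem_iff.mp hq, hh⟩
  · exact ⟨q, h.mem_iff.mpr hq, hh⟩

lemma pvCov_merge (L : List (Int × Int)) (t : Int) : pvCov (pvMerge L) t = pvCov L t := by
  unfold pvMerge
  rw [pvCov_foldl t _ [] (PySem.List.sorted_pairwise L (fun p => p.1)) (by simp)]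
  simp only [pvCov, List.any_nil, Bool.false_or]
  exact pvCov_perm (PySem.List.sorted_perm L (fun p => p.1) false) t

lemma pvCoverage_getD (y : List (String × List String)) (da : String) :
    (pvCoverage y).getD da [] = pvMerge ((pvBuckets y).getD da []) := by
  have hnodup : (pvBuckets y).keys.Nodup := by
    unfold pvBuckets
    rw [PySem.List.foldl_ite_eq_foldl_filter]
    rw [← List.foldl_map (f := fun q : (String × Int) × (String × Int) => (q.2.1, (q.1.2, q.2.2)))
        (g := fun d p => PySem.Dict.modify d p.1 [] (· ++ [p.2]))]
    exact PySem.Dict.nodup_keys_foldl_modify_key _ Prod.fst [] (fun _ p => (· ++ [p.2])) _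
      PySem.Dict.nodup_keys_empty
  have hitems : (pvCoverage y).items =
      (pvBuckets y).items.map (fun it => (it.1, pvMerge it.2)) := by
    have h := PySem.Dict.items_foldl_insert_fresh (pvBuckets y).items (fun it => it.1)
      (fun it => pvMerge it.2) PySem.Dict.empty
      (fun a _ => PySem.Dict.contains_empty _)
      (by simpa [PySem.Dict.keys] using hnodup)
    simpa using h
  have hkeys : (pvCoverage y).keys = (pvBuckets y).keys := by
    simp only [PySem.Dict.keys, hitems, List.map_map]
    rfl
  have hknodup : (pvCoverage y).keys.Nodup := by rw [hkeys]; exact hnodup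
  rcases hget : (pvBuckets y).get? da with _ | v
  · have h1 : (pvBuckets y).getD da [] = [] := PySem.Dict.getD_of_get?_eq_none _ _ hget
    have h2 : (pvCoverage y).get? da = none := by
      rw [PySem.Dict.get?_eq_none_iff_not_mem_keys, hkeys,
        ← PySem.Dict.get?_eq_none_iff_not_mem_keys]
      exact hget
    rw [h1, PySem.Dict.getD_of_get?_eq_none _ _ h2]
    rfl
  · have hmem := PySem.Dict.mem_items_of_get?_eq_some _ hget
    have hmem' : (da, pvMerge v) ∈ (pvCoverage y).items := by
      rw [hitems]
      exact List.mem_map.mpr ⟨(da, v), hmem, rfl⟩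
    rw [PySem.Dict.getD_of_mem_items _ hmem' hknodup,
      PySem.Dict.getD_of_mem_items _ hmem hnodup]

lemma pvBuckets_getD (y : List (String × List String)) (st2 en2 : List String)
    (hys : List.lookup "starts" y = some st2) (hye : List.lookup "ends" y = some en2)
    (h2 : ∀ s ∈ st2, pvWF s = true) (h3 : ∀ s ∈ en2, pvWF s = true) (da : String) :
    (pvBuckets y).getD da [] =
      ((((st2.zip en2).map (Prod.map pvSome pvSome)).filter
          (fun q => decide (q.1.2 < q.2.2))).filter (fun q => q.2.1 == da)).map
        (fun q => (q.1.2, q.2.2)) := by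
  unfold pvBuckets
  rw [hys, hye]
  simp only [Option.getD_some, pvParseList_eq _ h2, pvParseList_eq _ h3]
  rw [List.zip_map]
  rw [PySem.List.foldl_ite_eq_foldl_filter]
  rw [← List.foldl_map (f := fun q : (String × Int) × (String × Int) => (q.2.1, (q.1.2, q.2.2)))
      (g := fun d p => PySem.Dict.modify d p.1 [] (· ++ [p.2]))]
  rw [PySem.Dict.getD_foldl_modify_append, PySem.Dict.getD_empty, List.nil_append]
  rw [List.filter_map, List.map_map]
  rfl

-- B's directional test equals the common kernel
lemma pvHits_eq (x y : List (String × List String)) (st1 st2 en2 : List String)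
    (hx : List.lookup "starts" x = some st1)
    (hys : List.lookup "starts" y = some st2) (hye : List.lookup "ends" y = some en2)
    (h1 : ∀ s ∈ st1, pvWF s = true) (h2 : ∀ s ∈ st2, pvWF s = true)
    (h3 : ∀ s ∈ en2, pvWF s = true) :
    pvHits x (pvCoverage y) = pvConf st1 st2 en2 := by
  unfold pvHits pvConf
  rw [hx]
  simp only [Option.getD_some, pvParseList_eq _ h1, List.any_map]
  apply PySem.List.any_congr_mem
  intro s _
  simp only [Function.comp_apply]
  rw [pvCoverage_getD]
  have hm : ((pvMerge ((pvBuckets y).getD (pvSome s).1 [])).any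
      fun q => decide (q.1 < (pvSome s).2) && decide ((pvSome s).2 < q.2)) =
      pvCov ((pvBuckets y).getD (pvSome s).1 []) (pvSome s).2 := pvCov_merge _ _
  rw [hm, pvBuckets_getD y st2 en2 hys hye h2 h3]
  simp only [pvCov, List.any_map, List.any_filter]
  apply PySem.List.any_congr_mem
  intro q _
  rw [Bool.eq_iff_iff]
  simp only [pvHitP, Function.comp_apply, Prod.map_fst, Prod.map_snd, Bool.and_eq_true,
    decide_eq_true_eq, beq_iff_eq]
  constructor
  · rintro ⟨hlt, hday, hl, hr⟩
    exact ⟨⟨hday.symm, hr⟩, hl⟩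
  · rintro ⟨⟨hday, hta⟩, hts⟩
    exact ⟨by omega, hday.symm, hts, hta⟩

lemma pvOkSec_elim {d : List (String × List String)} (h : pvOkSec d = true) :
    ∃ st en, List.lookup "starts" d = some st ∧ List.lookup "ends" d = some en ∧
      st.length = en.length ∧ (∀ s ∈ st, pvWF s = true) ∧ (∀ s ∈ en, pvWF s = true) := by
  unfold pvOkSec at h
  rcases hs : List.lookup "starts" d with _ | st <;> rw [hs] at h <;>
    rcases he : List.lookup "ends" d with _ | en <;> rw [he] at h <;> simp at h
  exact ⟨st, en, rfl, rfl, h.1.1, fun s hs' => h.1.2 s hs', fun s hs' => h.2 s hs'⟩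

-- ===== VERDICT (by name: the statement is the Claim_ definition above) =====
theorem time_conflicts_spec : Claim_equal_time_conflicts := by
  intro s1 s2 _ hpre
  unfold Spec_time_conflicts
  unfold Pre_time_conflicts at hpre
  rcases s1 with _ | d1 <;> rcases s2 with _ | d2
  · rfl
  · rfl
  · rfl
  simp only [Bool.or_eq_true, Bool.and_eq_true] at hpre
  by_cases hd1 : d1.isEmpty = true
  · simp [time_conflicts, time_conflicts_alt, hd1]
  by_cases hd2 : d2.isEmpty = true
  · simp [time_conflicts, time_conflicts_alt, hd2]
  have hok : pvOkSec d1 = true ∧ pvOkSec d2 = true := by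
    rcases hpre with (h | h) | h
    · exact absurd h hd1
    · exact absurd h hd2
    · exact h
  obtain ⟨st1, en1, hS1, hE1, hL1, hW1s, hW1e⟩ := pvOkSec_elim hok.1
  obtain ⟨st2, en2, hS2, hE2, hL2, hW2s, hW2e⟩ := pvOkSec_elim hok.2
  simp only [time_conflicts, time_conflicts_alt, hd1, hd2, Bool.or_self, hS1, hS2]
  rw [pvOuterA_eq d2 st2 en2 hS2 hE2 hW2s hW2e hL2 st1 hW1s,
      pvOuterA_eq d1 st1 en1 hS1 hE1 hW1s hW1e hL1 st2 hW2s,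
      pvHits_eq d1 d2 st1 st2 en2 hS1 hS2 hE2 hW1s hW2s hW2e,
      pvHits_eq d2 d1 st2 st1 en1 hS2 hS1 hE1 hW2s hW1s hW1e]
  cases pvConf st1 st2 en2 <;> simp
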